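-- pv_equiv track=rewrite | github.com/magurman/openai-gym-rl | visualize.py | reorganizeLabels
-- ===== SOURCE A (Python) =====
-- def reorganizeLabels(data, labels):
--     lists = [labels]
--     for i in data:
--         lists.append(i)
--
--     listsZipped = zip(*lists)
--     sortedList = sorted(listsZipped, key= lambda pair: pair[0])
--     zipped = list(zip(*sortedList))
--
--     return zipped
-- ===== SOURCE B (Python) =====
-- def reorganizeLabels(data, labels):
--     # index-permutation sort-and-gather instead of transpose/sort-tuples/transpose
--     n = min([len(labels)] + [len(col) for col in data])
--     if n == 0:
--         return []
--     order = sorted(range(n), key=lambda i: labels[i])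
--     out = [tuple(labels[i] for i in order)]
--     for col in data:
--         out.append(tuple(col[i] for i in order))
--     return out
-- ===== Notes on version B (the rewrite author's own statement) =====
-- stated objective: alternative
-- what changed: Instead of zipping all columns into tuples, sorting the tuples and zipping back, B computes a stable sort permutation of the row indices keyed by labels and gathers each column through that permutation.
import Mathlib
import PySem

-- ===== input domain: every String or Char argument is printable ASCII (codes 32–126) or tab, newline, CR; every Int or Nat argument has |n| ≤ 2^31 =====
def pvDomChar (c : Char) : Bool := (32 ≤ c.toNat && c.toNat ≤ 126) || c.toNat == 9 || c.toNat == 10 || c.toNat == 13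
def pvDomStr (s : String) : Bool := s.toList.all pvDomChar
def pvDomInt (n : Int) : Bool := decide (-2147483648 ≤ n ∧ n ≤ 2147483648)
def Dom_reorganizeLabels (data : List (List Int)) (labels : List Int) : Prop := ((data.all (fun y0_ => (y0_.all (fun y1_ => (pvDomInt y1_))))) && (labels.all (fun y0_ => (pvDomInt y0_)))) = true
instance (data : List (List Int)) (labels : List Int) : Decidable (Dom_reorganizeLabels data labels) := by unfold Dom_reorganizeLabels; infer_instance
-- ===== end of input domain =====

-- B replaces A's zip/sort-tuples/unzip pipeline by a sorted index permutation that is gathered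
-- through each column (alternative decomposition, same result).


-- ===== PORT A =====
-- zip(*ls): exact Python semantics — one row of current heads per step, stopping when the
-- shortest list is exhausted (fuel = length of the shortest list; zero lists give no rows).
def pvMinLen (ls : List (List Int)) : Nat :=
  match ls with
  | [] => 0
  | h :: t => t.foldl (fun m l => min m l.length) h.length

def pvZipGo : Nat → List (List Int) → List (List Int)
  | 0, _ => []
  | n+1, ls => (ls.map (fun l => l.headI)) :: pvZipGo n (ls.map (fun l => l.tail))

def pvZipStar (ls : List (List Int)) : List (List Int) := pvZipGo (pvMinLen ls) ls

def reorganizeLabels (data : List (List Int)) (labels : List Int) : List (List Int) :=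
  let lists := data.foldl (fun acc i => acc ++ [i]) [labels]
  let listsZipped := pvZipStar lists
  let sortedList := PySem.List.sorted listsZipped (fun pair => PySem.List.pyGetD pair 0 0) false
  pvZipStar sortedList

-- ===== PORT B =====
def reorganizeLabels_alt (data : List (List Int)) (labels : List Int) : List (List Int) :=
  let n := data.foldl (fun m col => min m col.length) labels.length
  if n = 0 then []
  else
    -- indices are drawn from range n, so every access labels[i] / col[i] is in range (getD is exact here)
    let order := PySem.List.sorted (List.range n) (fun i => labels.getD i 0) false
    (order.map (fun i => labels.getD i 0)) :: data.map (fun col => order.map (fun i => col.getD i 0))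

-- ===== PRECONDITION & SPEC =====
def Spec_reorganizeLabels (data : List (List Int)) (labels : List Int) (out : List (List Int)) : Prop := out = reorganizeLabels_alt data labels
instance (data : List (List Int)) (labels : List Int) (out : List (List Int)) : Decidable (Spec_reorganizeLabels data labels out) := by unfold Spec_reorganizeLabels; infer_instance

-- ===== CLAIM (what is proved, stated in full; the proofs are below) =====
def Claim_equal_reorganizeLabels : Prop := ∀ (data : List (List Int)) (labels : List Int), Dom_reorganizeLabels data labels → Spec_reorganizeLabels data labels (reorganizeLabels data labels)

-- ===== LEMMAS AND PROOFS =====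

theorem pvZipGo_eq (fuel : Nat) (ls : List (List Int)) :
    pvZipGo fuel ls = (List.range fuel).map (fun i => ls.map (fun l => l.getD i 0)) := by
  induction fuel generalizing ls with
  | zero => simp [pvZipGo]
  | succ n ih =>
    rw [List.range_succ_eq_map]
    simp only [pvZipGo, List.map_cons, List.map_map, ih, List.cons.injEq]
    constructor
    · exact List.map_congr_left (fun l _ => by cases l <;> simp)
    · exact List.map_congr_left (fun i _ => by
        simp only [Function.comp]
        exact List.map_congr_left (fun l _ => by cases l <;> simp))

theorem pvInsertBy_map {α β : Type} (f : α → β) (before : β → β → Bool) (x : α) (ys : List α) :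
    PySem.List.insertBy before (f x) (ys.map f)
      = (PySem.List.insertBy (fun a b => before (f a) (f b)) x ys).map f := by
  induction ys with
  | nil => simp [PySem.List.insertBy]
  | cons y ys ih =>
    simp only [List.map_cons, PySem.List.insertBy]
    by_cases h : before (f x) (f y) <;> simp [h, ih]

theorem pvSorted_map {α β κ : Type} [LinearOrder κ] (f : α → β) (key : β → κ) (xs : List α) :
    PySem.List.sorted (xs.map f) key false
      = (PySem.List.sorted xs (fun a => key (f a)) false).map f := by
  rw [PySem.List.sorted_eq_foldl_insertBy, PySem.List.sorted_eq_foldl_insertBy]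
  suffices h : ∀ acc : List α,
      (xs.map f).foldl (fun acc x => PySem.List.insertBy (fun a b => decide (key a < key b)) x acc) (acc.map f)
        = (xs.foldl (fun acc x => PySem.List.insertBy (fun a b => decide (key (f a) < key (f b))) x acc) acc).map f by
    simpa using h []
  induction xs with
  | nil => intro acc; simp
  | cons x xs ih =>
    intro acc
    simp only [List.map_cons, List.foldl_cons]
    rw [pvInsertBy_map f (fun a b => decide (key a < key b)) x acc]
    exact ih _

theorem pvMinLen_const (c : Nat) (ls : List (List Int)) (h : ∀ l ∈ ls, l.length = c) :
    ls.foldl (fun m l => min m l.length) c = c := by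
  induction ls generalizing c with
  | nil => rfl
  | cons l ls ih =>
    simp only [List.foldl_cons, h l (by simp)]
    simp only [min_self]
    exact ih c (fun l' hl' => h l' (by simp [hl']))

theorem pvMapRange {α : Type} (g : List Int → α) (xs : List (List Int)) :
    (List.range xs.length).map (fun j => g (xs.getD j [])) = xs.map g := by
  induction xs with
  | nil => simp
  | cons x xs ih =>
    rw [List.length_cons, List.range_succ_eq_map]
    simp only [List.map_cons, List.getD_cons_zero, List.map_map]
    refine congrArg (g x :: ·) ?_
    rw [← ih]
    exact List.map_congr_left (fun j _ => by simp [Function.comp])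

-- ===== VERDICT (by name: the statement is the Claim_ definition above) =====
theorem reorganizeLabels_spec : Claim_equal_reorganizeLabels := by
  intro data labels _
  unfold Spec_reorganizeLabels reorganizeLabels reorganizeLabels_alt
  dsimp only
  have hlists : data.foldl (fun acc i => acc ++ [i]) [labels] = labels :: data := by
    rw [PySem.List.foldl_append_singleton]; rfl
  rw [hlists]
  set n := data.foldl (fun m col => min m col.length) labels.length with hn
  have hmin : pvMinLen (labels :: data) = n := rfl
  -- row builder
  set f : Nat → List Int := fun i => labels.getD i 0 :: data.map (fun col => col.getD i 0) with hf
  have hzip1 : pvZipStar (labels :: data) = (List.range n).map f := by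
    rw [pvZipStar, hmin, pvZipGo_eq]
    exact List.map_congr_left (fun i _ => by simp [hf])
  rw [hzip1]
  have hkey : (fun pair : List Int => PySem.List.pyGetD pair 0 0) = fun pair => pair.getD 0 0 := by
    funext pair; exact PySem.List.pyGetD_zero pair 0
  rw [hkey, pvSorted_map f (fun pair => pair.getD 0 0) (List.range n)]
  have hkf : (fun i => (f i).getD 0 0) = fun i => labels.getD i 0 := by
    funext i; simp [hf]
  rw [hkf]
  set order := PySem.List.sorted (List.range n) (fun i => labels.getD i 0) false with horder
  by_cases hzero : n = 0
  · rw [if_pos hzero]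
    have : order = [] := by
      rw [horder, hzero]; simp [PySem.List.sorted_eq_nil_iff]
    rw [this]
    simp [pvZipStar, pvMinLen, pvZipGo]
  · -- n > 0: order is nonempty, every row has length data.length + 1
    have hne : order ≠ [] := by
      rw [horder, Ne, PySem.List.sorted_eq_nil_iff]
      simp [List.range_eq_nil, hzero]
    have hlen : ∀ r ∈ order.map f, r.length = data.length + 1 := by
      intro r hr
      rcases List.mem_map.mp hr with ⟨i, _, rfl⟩
      simp [hf]
    have hminlen : pvMinLen (order.map f) = data.length + 1 := by
      rcases order with _ | ⟨o, rest⟩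
      · exact absurd rfl hne
      · simp only [List.map_cons, pvMinLen]
        rw [hlen (f o) (by simp)]
        exact pvMinLen_const _ _ (fun l hl => hlen l (by simp [hl]))
    rw [pvZipStar, hminlen, pvZipGo_eq, List.range_succ_eq_map]
    simp only [List.map_cons, List.map_map, if_neg hzero, List.cons.injEq]
    constructor
    · exact List.map_congr_left (fun i _ => by simp [hf])
    · rw [← pvMapRange (fun col => order.map (fun i => col.getD i 0)) data]
      refine List.map_congr_left (fun j hj => ?_)
      have hjlt : j < data.length := List.mem_range.mp hj
      simp only [Function.comp]
      refine List.map_congr_left (fun i _ => ?_)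
      simp [Function.comp, hf, List.getD_eq_getElem?_getD, List.getElem?_map,
            List.getElem?_eq_getElem hjlt]
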